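-- pv_equiv track=rewrite | github.com/Project-Aquarius-White/simple-1997-lstm-reproduction | assets/animations/07_bptt_complexity.py | _is_vertical_arrow
-- ===== SOURCE A (Python) =====
-- def _is_vertical_arrow(idx: int, num_cells: int) -> bool:
--     current_idx = 0
--     for error_i in range(num_cells):
--         for cell_j in range(error_i + 1):
--             if current_idx == idx:
--                 return error_i == cell_j
--             current_idx += 1
--     return False
-- ===== SOURCE B (Python) =====
-- def _is_vertical_arrow(idx: int, num_cells: int) -> bool:
--     # Scan rows only: row i starts at linear index i*(i+1)//2 and its
--     # diagonal cell sits at t = i*(i+3)//2.  idx is a diagonal arrow iff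
--     # idx equals t for some row i < num_cells.
--     for i in range(num_cells):
--         t = i * (i + 3) // 2
--         if t == idx:
--             return True
--         if t > idx:
--             return False
--     return False
-- ===== Notes on version B (the rewrite author's own statement) =====
-- stated objective: faster
-- what changed: Instead of walking every cell of the triangle with a running counter, B walks only the rows and compares idx against the closed-form diagonal index i*(i+3)//2 of each row, stopping early once it exceeds idx.
import Mathlib
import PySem

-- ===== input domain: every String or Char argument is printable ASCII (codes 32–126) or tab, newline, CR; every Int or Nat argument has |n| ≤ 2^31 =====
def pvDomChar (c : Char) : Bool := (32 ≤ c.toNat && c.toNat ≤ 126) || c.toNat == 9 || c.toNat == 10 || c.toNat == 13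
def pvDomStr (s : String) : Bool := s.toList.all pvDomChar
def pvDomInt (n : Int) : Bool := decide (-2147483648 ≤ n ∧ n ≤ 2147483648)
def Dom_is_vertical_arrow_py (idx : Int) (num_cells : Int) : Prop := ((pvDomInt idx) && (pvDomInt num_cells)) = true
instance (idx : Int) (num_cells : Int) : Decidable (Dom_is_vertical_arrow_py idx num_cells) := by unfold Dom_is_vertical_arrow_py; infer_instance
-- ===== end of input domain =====

-- B replaces A's cell-by-cell double loop by a single loop over rows comparing idx
-- with each row's closed-form diagonal index (objective: faster).


-- ===== PORT A =====
-- inner 'for cell_j in range(error_i + 1)' with the early return: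
-- returns (some b, cur) when the loop body returned b, (none, cur) when it fell through.
def pvInnerA (idx : Int) (ei : Int) (j : Int) (left : Nat) (cur : Int) : Option Bool × Int :=
  match left with
  | 0 => (none, cur)
  | Nat.succ l =>
    if cur = idx then (some (decide (ei = j)), cur)
    else pvInnerA idx ei (j + 1) l (cur + 1)

-- outer 'for error_i in range(num_cells)'
def pvOuterA (idx : Int) (ei : Int) (left : Nat) (cur : Int) : Bool :=
  match left with
  | 0 => false
  | Nat.succ l =>
    match pvInnerA idx ei 0 (ei + 1).toNat cur with
    | (some b, _) => b
    | (none, cur') => pvOuterA idx (ei + 1) l cur'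

def is_vertical_arrow_py (idx : Int) (num_cells : Int) : Bool :=
  pvOuterA idx 0 num_cells.toNat 0

-- ===== PORT B =====
-- 'for i in range(num_cells)' comparing idx with t = i*(i+3)//2
def pvRowB (idx : Int) (i : Int) (left : Nat) : Bool :=
  match left with
  | 0 => false
  | Nat.succ l =>
    let t := PySem.Int.floordiv (i * (i + 3)) 2
    if t = idx then true
    else if t > idx then false
    else pvRowB idx (i + 1) l

def is_vertical_arrow_py_alt (idx : Int) (num_cells : Int) : Bool :=
  pvRowB idx 0 num_cells.toNat

-- ===== PRECONDITION & SPEC =====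
def Spec_is_vertical_arrow_py (idx : Int) (num_cells : Int) (out : Bool) : Prop := out = is_vertical_arrow_py_alt idx num_cells
instance (idx : Int) (num_cells : Int) (out : Bool) : Decidable (Spec_is_vertical_arrow_py idx num_cells out) := by unfold Spec_is_vertical_arrow_py; infer_instance

-- ===== CLAIM (what is proved, stated in full; the proofs are below) =====
def Claim_equal_is_vertical_arrow_py : Prop := ∀ (idx : Int) (num_cells : Int), Dom_is_vertical_arrow_py idx num_cells → Spec_is_vertical_arrow_py idx num_cells (is_vertical_arrow_py idx num_cells)

-- ===== LEMMAS AND PROOFS =====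

-- The inner loop falls through (and advances cur by its length) when idx lies outside it.
theorem pvInnerA_miss (idx ei : Int) : ∀ (left : Nat) (j cur : Int),
    (idx < cur ∨ cur + left ≤ idx) →
    pvInnerA idx ei j left cur = (none, cur + left) := by
  intro left
  induction left with
  | zero => intro j cur _; simp [pvInnerA]
  | succ l ih =>
    intro j cur hout
    simp only [pvInnerA]
    rw [if_neg (by push_cast at hout; omega : ¬ cur = idx)]
    rw [ih (j + 1) (cur + 1) (by push_cast at hout ⊢; omega)]
    simp only [Prod.mk.injEq, true_and]
    push_cast; ring

-- The inner loop hits idx when cur ≤ idx < cur + left, answering whether ei = j + (idx - cur).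
theorem pvInnerA_hit (idx ei : Int) : ∀ (left : Nat) (j cur : Int),
    cur ≤ idx → idx < cur + left →
    (pvInnerA idx ei j left cur).1 = some (decide (ei = j + (idx - cur))) := by
  intro left
  induction left with
  | zero => intro j cur h1 h2; exfalso; simp at h2; omega
  | succ l ih =>
    intro j cur h1 h2
    simp only [pvInnerA]
    by_cases h : cur = idx
    · subst h; simp
    · rw [if_neg h]
      have h1' : cur + 1 ≤ idx := by omega
      have h2' : idx < cur + 1 + l := by push_cast at h2 ⊢; omega
      rw [ih (j + 1) (cur + 1) h1' h2']
      rw [show j + 1 + (idx - (cur + 1)) = j + (idx - cur) by ring]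

-- If idx lies strictly below the current counter it is never reached: A's loops fall through to False.
theorem pvOuterA_neg (idx : Int) : ∀ (left : Nat) (ei cur : Int),
    0 ≤ ei → idx < cur → pvOuterA idx ei left cur = false := by
  intro left
  induction left with
  | zero => intro ei cur _ _; simp [pvOuterA]
  | succ l ih =>
    intro ei cur hei hlt
    simp only [pvOuterA]
    rw [pvInnerA_miss idx ei ((ei + 1).toNat) 0 cur (Or.inl (by omega))]
    exact ih (ei + 1) _ (by omega) (by omega)

-- floordiv of an even product
theorem floordiv_two_mul (k : Int) : PySem.Int.floordiv (2 * k) 2 = k := by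
  simp [PySem.Int.floordiv, Int.mul_fdiv_cancel_left k (by norm_num : (2:Int) ≠ 0)]

-- Main invariant: entering row ei with counter cur = ei*(ei+1)/2 (i.e. 2*cur = ei*(ei+1))
-- and cur ≤ idx, A's cell walk and B's row scan agree.
theorem pvMain (idx : Int) : ∀ (left : Nat) (ei cur : Int),
    0 ≤ ei → 2 * cur = ei * (ei + 1) → cur ≤ idx →
    pvOuterA idx ei left cur = pvRowB idx ei left := by
  intro left
  induction left with
  | zero => intro ei cur _ _ _; simp [pvOuterA, pvRowB]
  | succ l ih =>
    intro ei cur hei hcur hle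
    have ht : PySem.Int.floordiv (ei * (ei + 3)) 2 = cur + ei := by
      have : ei * (ei + 3) = 2 * (cur + ei) := by nlinarith
      rw [this, floordiv_two_mul]
    simp only [pvOuterA, pvRowB, ht]
    by_cases hhit : idx < cur + ((ei + 1).toNat : Int)
    · -- inner loop returns some
      have h1 := pvInnerA_hit idx ei ((ei + 1).toNat) 0 cur hle hhit
      rcases heq : pvInnerA idx ei 0 ((ei + 1).toNat) cur with ⟨ob, c'⟩
      rw [heq] at h1; simp at h1; subst h1
      have htn : ((ei + 1).toNat : Int) = ei + 1 := by omega
      rw [htn] at hhit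
      by_cases hdiag : cur + ei = idx
      · simp [show (ei = 0 + (idx - cur)) from by omega]
      · rw [if_neg hdiag, if_pos (by omega : cur + ei > idx)]
        simp; omega
    · -- inner loop falls through
      have htn : ((ei + 1).toNat : Int) = ei + 1 := by omega
      rw [pvInnerA_miss idx ei ((ei + 1).toNat) 0 cur (Or.inr (by omega))]
      rw [if_neg (by omega : ¬ cur + ei = idx), if_neg (by omega : ¬ cur + ei > idx)]
      push_cast [htn] at hhit
      exact ih (ei + 1) (cur + (ei + 1).toNat) (by omega)
        (by rw [htn]; ring_nf; nlinarith) (by omega)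

-- ===== VERDICT (by name: the statement is the Claim_ definition above) =====
theorem is_vertical_arrow_py_spec : Claim_equal_is_vertical_arrow_py := by
  intro idx num_cells _
  show is_vertical_arrow_py idx num_cells = is_vertical_arrow_py_alt idx num_cells
  unfold is_vertical_arrow_py is_vertical_arrow_py_alt
  by_cases h : 0 ≤ idx
  · exact pvMain idx num_cells.toNat 0 0 le_rfl (by ring) h
  · rw [pvOuterA_neg idx num_cells.toNat 0 0 le_rfl (by omega)]
    cases hn : num_cells.toNat with
    | zero => simp [pvRowB]
    | succ l =>
      simp only [pvRowB]
      rw [show PySem.Int.floordiv (0 * (0 + 3)) 2 = 0 from by decide]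
      rw [if_neg (by omega : ¬ (0:Int) = idx), if_pos (by omega : (0:Int) > idx)]
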